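-- pv_equiv track=rewrite | github.com/meimeitou/MyAlgorithmTools | tmpdata/t13.py | find
-- ===== SOURCE A (Python) =====
-- def find(ls):
--     e=(0,0)
--     s=(0,0)
--     o=(0,0)
--     for i,row in enumerate(ls):
--         for j,col in enumerate(row):
--             if col=='E':
--                 e=(i,j)
--             elif col == 'S':
--                 s=(i,j)
--             elif col=='0':
--                 o=(i,j)
--     return e,o,s
-- ===== SOURCE B (Python) =====
-- def find(ls):
--     e = o = s = (0, 0)
--     fe = fo = fs = False
--     for i, row in reversed(list(enumerate(ls))):
--         for j, c in reversed(list(enumerate(row))):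
--             if not fe and c == 'E':
--                 e, fe = (i, j), True
--             elif not fs and c == 'S':
--                 s, fs = (i, j), True
--             elif not fo and c == '0':
--                 o, fo = (i, j), True
--             if fe and fs and fo:
--                 return e, o, s
--     return e, o, s
-- ===== Notes on version B (the rewrite author's own statement) =====
-- stated objective: alternative
-- what changed: Instead of overwriting positions on every match in a full forward scan, B scans the grid in reverse, records only the first (i.e. last-in-forward-order) occurrence of each of 'E', 'S', '0' using found-flags, and breaks out as soon as all three are located.
import Mathlib
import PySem

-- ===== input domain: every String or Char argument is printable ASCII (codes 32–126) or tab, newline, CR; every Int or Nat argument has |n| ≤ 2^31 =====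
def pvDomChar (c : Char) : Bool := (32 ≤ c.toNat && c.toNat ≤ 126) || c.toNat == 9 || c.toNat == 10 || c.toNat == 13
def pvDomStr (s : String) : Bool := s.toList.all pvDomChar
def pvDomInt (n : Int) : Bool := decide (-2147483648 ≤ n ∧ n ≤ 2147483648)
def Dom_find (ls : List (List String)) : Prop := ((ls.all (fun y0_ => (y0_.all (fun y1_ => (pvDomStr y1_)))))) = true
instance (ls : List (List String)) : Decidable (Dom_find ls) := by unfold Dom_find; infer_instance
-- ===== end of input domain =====

-- B replaces A's forward overwrite-on-every-match scan by a reverse scan with found-flags and an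
-- early break once all three of 'E', 'S', '0' are located (objective: alternative, same asymptotic cost).

-- ===== PORT A =====
-- body of A's inner loop: the if/elif/elif chain updating (e, s, o)
def aStep (i : Int) (st : (Int × Int) × (Int × Int) × (Int × Int)) (q : Int × String) :
    (Int × Int) × (Int × Int) × (Int × Int) :=
  if q.2 = "E" then ((i, q.1), st.2.1, st.2.2)
  else if q.2 = "S" then (st.1, (i, q.1), st.2.2)
  else if q.2 = "0" then (st.1, st.2.1, (i, q.1))
  else st

def find (ls : List (List String)) : (Int × Int) × (Int × Int) × (Int × Int) :=
  let st :=
    (PySem.List.enumerate ls).foldl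
      (fun st p => (PySem.List.enumerate p.2).foldl (fun st q => aStep p.1 st q) st)
      (((0, 0), (0, 0), (0, 0)) : (Int × Int) × (Int × Int) × (Int × Int))
  (st.1, st.2.2, st.2.1)   -- return e, o, s

-- ===== PORT B =====
-- B's loop state: the three recorded positions and their found-flags
structure BSt where
  e : Int × Int
  s : Int × Int
  o : Int × Int
  fe : Bool
  fs : Bool
  fo : Bool
deriving Repr, DecidableEq

-- body of B's inner loop: record (i, j) on the FIRST reverse-order occurrence of each character
def bCell (i : Int) (st : BSt) (q : Int × String) : BSt :=
  if st.fe = false ∧ q.2 = "E" then { st with e := (i, q.1), fe := true }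
  else if st.fs = false ∧ q.2 = "S" then { st with s := (i, q.1), fs := true }
  else if st.fo = false ∧ q.2 = "0" then { st with o := (i, q.1), fo := true }
  else st

-- inner loop over a reversed enumerated row; `.inr` = the early `return e, o, s`
def bRow (i : Int) : List (Int × String) → BSt → BSt ⊕ ((Int × Int) × (Int × Int) × (Int × Int))
  | [], st => .inl st
  | q :: rest, st =>
    let st' := bCell i st q
    if st'.fe ∧ st'.fs ∧ st'.fo then .inr (st'.e, st'.o, st'.s)
    else bRow i rest st'

-- outer loop over the reversed enumerated grid
def bRows : List (Int × List String) → BSt → BSt ⊕ ((Int × Int) × (Int × Int) × (Int × Int))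
  | [], st => .inl st
  | p :: rest, st =>
    match bRow p.1 (PySem.List.enumerate p.2).reverse st with
    | .inr r => .inr r
    | .inl st' => bRows rest st'

def find_alt (ls : List (List String)) : (Int × Int) × (Int × Int) × (Int × Int) :=
  match bRows (PySem.List.enumerate ls).reverse ⟨(0, 0), (0, 0), (0, 0), false, false, false⟩ with
  | .inr r => r
  | .inl st => (st.e, st.o, st.s)

-- ===== PRECONDITION & SPEC =====
def Spec_find (ls : List (List String)) (out : (Int × Int) × (Int × Int) × (Int × Int)) : Prop := out = find_alt ls
instance (ls : List (List String)) (out : (Int × Int) × (Int × Int) × (Int × Int)) : Decidable (Spec_find ls out) := by unfold Spec_find; infer_instance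

-- ===== CLAIM (what is proved, stated in full; the proofs are below) =====
def Claim_equal_find : Prop := ∀ (ls : List (List String)), Dom_find ls → Spec_find ls (find ls)

-- ===== LEMMAS AND PROOFS =====

-- the grid flattened to (row index, column index, cell) triples, in forward order
def cells (ls : List (List String)) : List (Int × Int × String) :=
  (PySem.List.enumerate ls).flatMap (fun p => (PySem.List.enumerate p.2).map (fun q => (p.1, q)))

-- A's nested loops are the flat fold of `aStep` over `cells`
theorem a_flat (ps : List (Int × List String))
    (st0 : (Int × Int) × (Int × Int) × (Int × Int)) :
    ps.foldl (fun st p => (PySem.List.enumerate p.2).foldl (fun st q => aStep p.1 st q) st) st0 =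
    (ps.flatMap (fun p => (PySem.List.enumerate p.2).map (fun q => (p.1, q)))).foldl
      (fun st t => aStep t.1 st t.2) st0 := by
  induction ps generalizing st0 with
  | nil => simp
  | cons p rest ih =>
    simp only [List.foldl_cons, List.flatMap_cons, List.foldl_append, List.foldl_map, ih]

-- the fold of `aStep` acts on the three components independently
theorem aStep_components (rl : List (Int × Int × String))
    (st : (Int × Int) × (Int × Int) × (Int × Int)) :
    rl.foldl (fun st t => aStep t.1 st t.2) st =
      (rl.foldl (fun acc t => if t.2.2 = "E" then (t.1, t.2.1) else acc) st.1,
       rl.foldl (fun acc t => if t.2.2 = "S" then (t.1, t.2.1) else acc) st.2.1,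
       rl.foldl (fun acc t => if t.2.2 = "0" then (t.1, t.2.1) else acc) st.2.2) := by
  induction rl generalizing st with
  | nil => rfl
  | cons t rest ih =>
    simp only [List.foldl_cons]
    rw [ih]
    have h1 : (aStep t.1 st t.2).1 = if t.2.2 = "E" then (t.1, t.2.1) else st.1 := by
      simp only [aStep]; split_ifs <;> rfl
    have h2 : (aStep t.1 st t.2).2.1 = if t.2.2 = "S" then (t.1, t.2.1) else st.2.1 := by
      simp only [aStep]; split_ifs with hE hS <;> first | rfl | simp_all
    have h3 : (aStep t.1 st t.2).2.2 = if t.2.2 = "0" then (t.1, t.2.1) else st.2.2 := by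
      simp only [aStep]; split_ifs with hE hS hO <;> first | rfl | simp_all
    rw [h1, h2, h3]

-- overwrite-on-match fold = last match = first match of the reversed list
theorem foldl_overwrite (P : Int × Int × String → Prop) [DecidablePred P]
    (pos : Int × Int × String → Int × Int) (l : List (Int × Int × String)) (d : Int × Int) :
    l.foldl (fun acc t => if P t then pos t else acc) d =
      (match l.reverse.find? (fun t => decide (P t)) with
       | some t => pos t | none => d) := by
  induction l generalizing d with
  | nil => simp
  | cons x xs ih =>
    simp only [List.foldl_cons, List.reverse_cons, List.find?_append, ih]
    cases h : xs.reverse.find? (fun t => decide (P t)) with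
    | some t => simp
    | none =>
      by_cases hp : P x <;> simp [List.find?, hp]

-- first-match fold with a done-flag: once the flag is set nothing changes
theorem foldl_flag_done (P : Int × Int × String → Prop) [DecidablePred P]
    (pos : Int × Int × String → Int × Int) (l : List (Int × Int × String)) (v : Int × Int) :
    l.foldl (fun (p : (Int × Int) × Bool) t => if p.2 = false ∧ P t then (pos t, true) else p)
      (v, true) = (v, true) := by
  induction l with
  | nil => rfl
  | cons x xs ih => simp [ih]

-- first-match fold = find?
theorem foldl_firstmatch (P : Int × Int × String → Prop) [DecidablePred P]
    (pos : Int × Int × String → Int × Int) (l : List (Int × Int × String)) (d : Int × Int) :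
    (l.foldl (fun (p : (Int × Int) × Bool) t => if p.2 = false ∧ P t then (pos t, true) else p)
      (d, false)).1 =
      (match l.find? (fun t => decide (P t)) with
       | some t => pos t | none => d) := by
  induction l generalizing d with
  | nil => simp
  | cons x xs ih =>
    by_cases hp : P x
    · simp [List.foldl_cons, hp, List.find?, foldl_flag_done]
    · simp [List.foldl_cons, hp, List.find?, ih]

-- B without the break: the plain fold of `bCell` over flat triples
def bPure (rl : List (Int × Int × String)) (st : BSt) : BSt :=
  rl.foldl (fun st t => bCell t.1 st t.2) st

-- B's flat loop WITH the break
def bFlat : List (Int × Int × String) → BSt → BSt ⊕ ((Int × Int) × (Int × Int) × (Int × Int))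
  | [], st => .inl st
  | t :: rest, st =>
    let st' := bCell t.1 st t.2
    if st'.fe ∧ st'.fs ∧ st'.fo then .inr (st'.e, st'.o, st'.s)
    else bFlat rest st'

def extractB : BSt ⊕ ((Int × Int) × (Int × Int) × (Int × Int)) → (Int × Int) × (Int × Int) × (Int × Int)
  | .inl st => (st.e, st.o, st.s)
  | .inr r => r

theorem bRow_eq_bFlat (i : Int) (qs : List (Int × String)) (st : BSt) :
    bRow i qs st = bFlat (qs.map (fun q => ((i, q) : Int × Int × String))) st := by
  induction qs generalizing st with
  | nil => rfl
  | cons q rest ih => simp [bRow, bFlat, ih]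

theorem bFlat_append (l1 l2 : List (Int × Int × String)) (st : BSt) :
    bFlat (l1 ++ l2) st =
      (match bFlat l1 st with
       | .inr r => .inr r
       | .inl st' => bFlat l2 st') := by
  induction l1 generalizing st with
  | nil => rfl
  | cons t rest ih =>
    simp only [List.cons_append, bFlat]
    split <;> simp [ih]

theorem bRows_eq_bFlat (ps : List (Int × List String)) (st : BSt) :
    bRows ps st =
      bFlat (ps.flatMap (fun p => (PySem.List.enumerate p.2).reverse.map
        (fun q => ((p.1, q) : Int × Int × String)))) st := by
  induction ps generalizing st with
  | nil => rfl
  | cons p rest ih =>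
    simp only [bRows, List.flatMap_cons, bFlat_append, bRow_eq_bFlat, ih]

-- once all three flags are set, `bCell` is the identity
theorem bPure_done (rl : List (Int × Int × String)) (st : BSt)
    (he : st.fe = true) (hs : st.fs = true) (ho : st.fo = true) : bPure rl st = st := by
  induction rl generalizing st with
  | nil => rfl
  | cons t rest ih =>
    simp only [bPure, List.foldl_cons, bCell, he, hs, ho]
    simp only [bPure] at ih
    exact ih st he hs ho

-- the break does not change the returned value
theorem bFlat_extract (rl : List (Int × Int × String)) (st : BSt) :
    extractB (bFlat rl st) = ((bPure rl st).e, (bPure rl st).o, (bPure rl st).s) := by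
  induction rl generalizing st with
  | nil => rfl
  | cons t rest ih =>
    simp only [bFlat, bPure, List.foldl_cons]
    by_cases hb : (bCell t.1 st t.2).fe ∧ (bCell t.1 st t.2).fs ∧ (bCell t.1 st t.2).fo
    · have := bPure_done rest (bCell t.1 st t.2) hb.1 hb.2.1 hb.2.2
      simp only [bPure] at this
      simp [hb, extractB, this]
    · simp only [hb, if_false]
      exact ih _

-- the fold of `bCell` acts on the three (position, flag) pairs independently
theorem bPure_components (rl : List (Int × Int × String)) (st : BSt) :
    bPure rl st =
      ⟨(rl.foldl (fun (p : (Int × Int) × Bool) t => if p.2 = false ∧ t.2.2 = "E" then ((t.1, t.2.1), true) else p) (st.e, st.fe)).1,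
       (rl.foldl (fun (p : (Int × Int) × Bool) t => if p.2 = false ∧ t.2.2 = "S" then ((t.1, t.2.1), true) else p) (st.s, st.fs)).1,
       (rl.foldl (fun (p : (Int × Int) × Bool) t => if p.2 = false ∧ t.2.2 = "0" then ((t.1, t.2.1), true) else p) (st.o, st.fo)).1,
       (rl.foldl (fun (p : (Int × Int) × Bool) t => if p.2 = false ∧ t.2.2 = "E" then ((t.1, t.2.1), true) else p) (st.e, st.fe)).2,
       (rl.foldl (fun (p : (Int × Int) × Bool) t => if p.2 = false ∧ t.2.2 = "S" then ((t.1, t.2.1), true) else p) (st.s, st.fs)).2,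
       (rl.foldl (fun (p : (Int × Int) × Bool) t => if p.2 = false ∧ t.2.2 = "0" then ((t.1, t.2.1), true) else p) (st.o, st.fo)).2⟩ := by
  induction rl generalizing st with
  | nil => rfl
  | cons t rest ih =>
    simp only [bPure, List.foldl_cons]
    simp only [bPure] at ih
    rw [ih]
    have he : ((bCell t.1 st t.2).e, (bCell t.1 st t.2).fe) =
        (if st.fe = false ∧ t.2.2 = "E" then ((t.1, t.2.1), true) else (st.e, st.fe)) := by
      simp only [bCell]; split_ifs <;> rfl
    have hs : ((bCell t.1 st t.2).s, (bCell t.1 st t.2).fs) =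
        (if st.fs = false ∧ t.2.2 = "S" then ((t.1, t.2.1), true) else (st.s, st.fs)) := by
      simp only [bCell]; split_ifs with c1 c2 <;> first | rfl | simp_all
    have ho : ((bCell t.1 st t.2).o, (bCell t.1 st t.2).fo) =
        (if st.fo = false ∧ t.2.2 = "0" then ((t.1, t.2.1), true) else (st.o, st.fo)) := by
      simp only [bCell]; split_ifs with c1 c2 c3 <;> first | rfl | simp_all
    rw [he, hs, ho]

-- the reversed flat cell list is what B's loops traverse
theorem cells_reverse (ls : List (List String)) :
    (cells ls).reverse =
      (PySem.List.enumerate ls).reverse.flatMap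
        (fun p => (PySem.List.enumerate p.2).reverse.map (fun q => ((p.1, q) : Int × Int × String))) := by
  simp only [cells, List.reverse_flatMap]
  refine congrArg (fun f => List.flatMap f (PySem.List.enumerate ls).reverse) ?_
  funext p
  simp [List.map_reverse]

-- ===== VERDICT (by name: the statement is the Claim_ definition above) =====
theorem find_spec : Claim_equal_find := by
  intro ls _
  unfold Spec_find
  have hA : find ls =
      ((match (cells ls).reverse.find? (fun t => decide (t.2.2 = "E")) with
        | some t => (t.1, t.2.1) | none => ((0 : Int), (0 : Int))),
       (match (cells ls).reverse.find? (fun t => decide (t.2.2 = "0")) with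
        | some t => (t.1, t.2.1) | none => ((0 : Int), (0 : Int))),
       (match (cells ls).reverse.find? (fun t => decide (t.2.2 = "S")) with
        | some t => (t.1, t.2.1) | none => ((0 : Int), (0 : Int)))) := by
    show (let st := (PySem.List.enumerate ls).foldl
            (fun st p => (PySem.List.enumerate p.2).foldl (fun st q => aStep p.1 st q) st)
            (((0, 0), (0, 0), (0, 0)) : (Int × Int) × (Int × Int) × (Int × Int))
          (st.1, st.2.2, st.2.1)) = _
    rw [a_flat, aStep_components,
        foldl_overwrite (fun t => t.2.2 = "E") (fun t => (t.1, t.2.1)),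
        foldl_overwrite (fun t => t.2.2 = "S") (fun t => (t.1, t.2.1)),
        foldl_overwrite (fun t => t.2.2 = "0") (fun t => (t.1, t.2.1))]
    rfl
  have hB : find_alt ls =
      ((match (cells ls).reverse.find? (fun t => decide (t.2.2 = "E")) with
        | some t => (t.1, t.2.1) | none => ((0 : Int), (0 : Int))),
       (match (cells ls).reverse.find? (fun t => decide (t.2.2 = "0")) with
        | some t => (t.1, t.2.1) | none => ((0 : Int), (0 : Int))),
       (match (cells ls).reverse.find? (fun t => decide (t.2.2 = "S")) with
        | some t => (t.1, t.2.1) | none => ((0 : Int), (0 : Int)))) := by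
    have hm : find_alt ls = extractB (bRows (PySem.List.enumerate ls).reverse
        ⟨(0, 0), (0, 0), (0, 0), false, false, false⟩) := by
      unfold find_alt
      cases h : bRows (PySem.List.enumerate ls).reverse
          ⟨(0, 0), (0, 0), (0, 0), false, false, false⟩ <;> simp [extractB]
    rw [hm, bRows_eq_bFlat, ← cells_reverse, bFlat_extract, bPure_components,
        foldl_firstmatch (fun t => t.2.2 = "E") (fun t => (t.1, t.2.1)),
        foldl_firstmatch (fun t => t.2.2 = "S") (fun t => (t.1, t.2.1)),
        foldl_firstmatch (fun t => t.2.2 = "0") (fun t => (t.1, t.2.1))]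
  rw [hA, hB]
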